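-- pv_equiv track=rewrite | github.com/moshiyiqie/HeaderXtractor | py_scikit/StringManager.py | hasBigComma
-- ===== SOURCE A (Python) =====
-- def hasBigComma(s, tmpStr):
-- 	has = False
-- 	s = s.replace(' and ', ' , ')
-- 	s = s.replace('*', '')
-- 	tmp=''
-- 	for word in s.split():
-- 		for i in range(len(word)):
-- 			if word[i]==',' and (i==0 or not str.isdigit(word[i-1]) ) and (i+1==len(word) or not str.isdigit(word[i+1])  ):
-- 				word= word[:i] + '#' + word[i+1:]
-- 				has = True
-- 		tmp += word + ' '
-- 	tmpStr.append(tmp)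
-- 	return has
-- ===== SOURCE B (Python) =====
-- def hasBigComma(s, tmpStr):
--     # Mark qualifying commas on the WHOLE string before any word split:
--     # a comma counts when its raw-string neighbours are not digits (string
--     # ends and whitespace are non-digits, so word boundaries need no special
--     # case).  The flag is simply "did the marking change the string".
--     s = s.replace(' and ', ' , ').replace('*', '')
--     fixed = []
--     for i, c in enumerate(s):
--         if (c == ','
--                 and not (i > 0 and s[i - 1].isdigit())
--                 and not (i + 1 < len(s) and s[i + 1].isdigit())):
--             fixed.append('#')
--         else:
--             fixed.append(c)
--     t = ''.join(fixed)
--     tmpStr.append(''.join(w + ' ' for w in t.split()))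
--     return t != s
-- ===== Notes on version B (the rewrite author's own statement) =====
-- stated objective: alternative
-- what changed: B removes A's per-word processing entirely: it marks qualifying commas in ONE pass over the whole (replaced) string, using raw-string neighbours with string ends and whitespace as the non-digit boundaries (so word edges need no special case), derives the flag from whether the marking changed the string, and splits only once at the end to rebuild the appended tmp string; A instead splits first and runs an index loop per word that rebuilds the word by slicing at every hit.
import Mathlib
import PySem

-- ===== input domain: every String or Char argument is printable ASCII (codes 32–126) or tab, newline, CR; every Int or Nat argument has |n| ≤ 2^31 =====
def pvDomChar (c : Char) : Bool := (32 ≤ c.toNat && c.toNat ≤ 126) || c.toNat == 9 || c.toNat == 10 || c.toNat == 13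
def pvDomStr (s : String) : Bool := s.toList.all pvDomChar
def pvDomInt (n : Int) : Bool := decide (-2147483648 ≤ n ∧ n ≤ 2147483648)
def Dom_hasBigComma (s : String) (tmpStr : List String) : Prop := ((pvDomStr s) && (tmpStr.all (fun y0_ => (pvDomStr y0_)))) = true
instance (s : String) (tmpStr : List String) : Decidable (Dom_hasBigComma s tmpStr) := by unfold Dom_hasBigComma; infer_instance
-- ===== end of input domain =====

-- B drops A's word loop entirely: it marks qualifying commas on the WHOLE string (string
-- ends and whitespace are the non-digit boundaries) and derives the flag from "did the
-- marking change the string"; equivalence is about the RETURN value only (both Pythons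
-- also append the same rebuilt string to tmpStr).

-- ===== PORT A =====
-- inner loop: for i in range(len(word)): if word[i]==',' and … : word = word[:i]+'#'+word[i+1:]; has = True
def hasBigCommaInner (w0 : List Char) (has : Bool) : List Char × Bool :=
  (PySem.List.pyRange 0 (PySem.Chars.len w0) 1).foldl
    (fun q i =>
      if PySem.List.pyGet? q.1 i == some ','
         && ((i == 0) || !(PySem.Chars.isdigit (PySem.List.pyGetD q.1 (i - 1) ' ')))
         && ((i + 1 == PySem.Chars.len q.1) || !(PySem.Chars.isdigit (PySem.List.pyGetD q.1 (i + 1) ' ')))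
      then (PySem.List.slice q.1 none (some i) ++ ['#'] ++ PySem.List.slice q.1 (some (i + 1)) none, true)
      else q)
    (w0, has)

def hasBigComma (s : String) (_tmpStr : List String) : Bool :=
  let s1 := PySem.Str.replace s " and " " , "
  let s2 := PySem.Str.replace s1 "*" ""
  let r := (PySem.Str.split₀ s2).foldl
    (fun (st : Bool × List Char) word =>
      let p := hasBigCommaInner word.toList st.1
      (p.2, st.2 ++ p.1 ++ [' ']))
    (false, [])
  r.1

-- ===== PORT B =====
-- for i, c in enumerate(s): fixed.append('#' if c==',' and not (i>0 and s[i-1].isdigit())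
--                                              and not (i+1<len(s) and s[i+1].isdigit()) else c)
def bMark (cs : List Char) : List Char :=
  cs.zipIdx.map (fun ci =>
    if ci.1 == ','
       && !(decide (0 < ci.2) && PySem.Chars.isdigit (cs.getD (ci.2 - 1) ' '))
       && !(decide (ci.2 + 1 < cs.length) && PySem.Chars.isdigit (cs.getD (ci.2 + 1) ' '))
    then '#' else ci.1)

-- return t != s  (string inequality = inequality of the char lists)
def hasBigComma_alt (s : String) (_tmpStr : List String) : Bool :=
  let s2 := PySem.Str.replace (PySem.Str.replace s " and " " , ") "*" ""
  decide (bMark s2.toList ≠ s2.toList)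

-- ===== PRECONDITION & SPEC =====
def Spec_hasBigComma (s : String) (tmpStr : List String) (out : Bool) : Prop := out = hasBigComma_alt s tmpStr
instance (s : String) (tmpStr : List String) (out : Bool) : Decidable (Spec_hasBigComma s tmpStr out) := by unfold Spec_hasBigComma; infer_instance

-- ===== CLAIM (what is proved, stated in full; the proofs are below) =====
def Claim_equal_hasBigComma : Prop := ∀ (s : String) (tmpStr : List String), Dom_hasBigComma s tmpStr → Spec_hasBigComma s tmpStr (hasBigComma s tmpStr)

-- ===== LEMMAS AND PROOFS =====

-- trigger condition on the ORIGINAL word, at natural index k (A's guard, word-relative)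
def trig (w0 : List Char) (k : Nat) : Bool :=
  (w0.getD k ' ' == ',') && (decide (k = 0) || !(PySem.Chars.isdigit (w0.getD (k - 1) ' ')))
    && (decide (k + 1 = w0.length) || !(PySem.Chars.isdigit (w0.getD (k + 1) ' ')))

-- uniform neighbour condition at index i of cs, previous char read from p :: cs
def P (p : Char) (cs : List Char) (i : Nat) : Bool :=
  (cs.getD i ' ' == ',') && !(PySem.Chars.isdigit ((p :: cs).getD i ' '))
    && !(PySem.Chars.isdigit (cs.getD (i + 1) ' '))

-- lookahead scan: any comma in cs with non-digit left neighbour (prev char p) and right neighbour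
def scan2 (p : Char) : List Char → Bool
  | [] => false
  | c :: rest => ((c == ',') && !(PySem.Chars.isdigit p) && !(PySem.Chars.isdigit (rest.getD 0 ' '))) || scan2 c rest

-- one-char-delay automaton: state = (previous char is an eligible comma, previous char is a digit)
def stepSt (st : Bool × Bool) (c : Char) : Bool × Bool :=
  ((c == ',') && !st.2, PySem.Chars.isdigit c)

def run (st : Bool × Bool) : List Char → Bool
  | [] => st.1
  | c :: rest => (st.1 && !(PySem.Chars.isdigit c)) || run (stepSt st c) rest

def fired (st : Bool × Bool) : List Char → Bool
  | [] => false
  | c :: rest => (st.1 && !(PySem.Chars.isdigit c)) || fired (stepSt st c) rest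

-- ===== A-side: the inner loop computes "any trig" on the original word =====

-- word after the first k iterations of A's inner loop
def fpart (w0 : List Char) (k : Nat) : List Char :=
  (List.range w0.length).map (fun j => if j < k ∧ trig w0 j = true then '#' else w0.getD j ' ')

theorem length_fpart (w0 : List Char) (k : Nat) : (fpart w0 k).length = w0.length := by
  simp [fpart]

theorem getD_fpart (w0 : List Char) (k j : Nat) (hj : j < w0.length) :
    (fpart w0 k).getD j ' ' = if j < k ∧ trig w0 j = true then '#' else w0.getD j ' ' := by
  simp [fpart, List.getD_eq_getElem?_getD, hj]

theorem isdigit_fpart (w0 : List Char) (k j : Nat) :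
    PySem.Chars.isdigit ((fpart w0 k).getD j ' ') = PySem.Chars.isdigit (w0.getD j ' ') := by
  by_cases hj : j < w0.length
  · rw [getD_fpart w0 k j hj]
    by_cases h : j < k ∧ trig w0 j = true
    · rw [if_pos h]
      have hc : w0.getD j ' ' = ',' := by
        have ht := h.2
        unfold trig at ht
        simp only [Bool.and_eq_true, beq_iff_eq] at ht
        exact ht.1.1
      rw [hc]
      decide
    · rw [if_neg h]
  · have h1 : (fpart w0 k).getD j ' ' = ' ' := by
      apply List.getD_eq_default
      simpa [length_fpart] using Nat.le_of_not_lt hj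
    have h2 : w0.getD j ' ' = ' ' := List.getD_eq_default _ _ (Nat.le_of_not_lt hj)
    rw [h1, h2]

theorem fpart_zero (w0 : List Char) : fpart w0 0 = w0 := by
  apply List.ext_getElem
  · simp [fpart]
  · intro j h1 h2
    simp [fpart, List.getD_eq_getElem?_getD, List.getElem?_eq_getElem h2]

theorem fpart_succ_of_trig (w0 : List Char) (k : Nat) (hk : k < w0.length)
    (ht : trig w0 k = true) : fpart w0 (k + 1) = (fpart w0 k).set k '#' := by
  apply List.ext_getElem
  · simp [fpart]
  · intro j h1 h2
    rw [List.getElem_set]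
    simp only [fpart, List.getElem_map, List.getElem_range]
    have hj : j < w0.length := by simpa [fpart] using h1
    by_cases hjk : j = k
    · subst hjk
      simp [ht]
    · have hne : ¬ k = j := fun hh => hjk hh.symm
      have this2 : (j ≤ k ∧ trig w0 j = true) ↔ (j < k ∧ trig w0 j = true) := by
        constructor
        · rintro ⟨h, t⟩; exact ⟨by omega, t⟩
        · rintro ⟨h, t⟩; exact ⟨by omega, t⟩
      simp [hne, this2]

theorem fpart_succ_of_not_trig (w0 : List Char) (k : Nat)
    (ht : trig w0 k = false) : fpart w0 (k + 1) = fpart w0 k := by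
  unfold fpart
  apply List.map_congr_left
  intro j _
  have hle : (j ≤ k ∧ trig w0 j = true) ↔ (j < k ∧ trig w0 j = true) := by
    constructor
    · rintro ⟨h, t⟩
      rcases Nat.lt_or_eq_of_le h with h' | h'
      · exact ⟨h', t⟩
      · subst h'; rw [ht] at t; cases t
    · rintro ⟨h, t⟩; exact ⟨by omega, t⟩
  simp [hle]

theorem inner_inv (w0 : List Char) (has : Bool) (k : Nat) (hk : k ≤ w0.length) :
    (PySem.List.pyRange 0 (k : Int) 1).foldl
      (fun q i =>
        if PySem.List.pyGet? q.1 i == some ','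
           && ((i == 0) || !(PySem.Chars.isdigit (PySem.List.pyGetD q.1 (i - 1) ' ')))
           && ((i + 1 == PySem.Chars.len q.1) || !(PySem.Chars.isdigit (PySem.List.pyGetD q.1 (i + 1) ' ')))
        then (PySem.List.slice q.1 none (some i) ++ ['#'] ++ PySem.List.slice q.1 (some (i + 1)) none, true)
        else q)
      (w0, has)
    = (fpart w0 k, has || (List.range k).any (trig w0)) := by
  induction k with
  | zero =>
      rw [fpart_zero]
      simp [PySem.List.pyRange]
  | succ k ih =>
      have hk' : k ≤ w0.length := by omega
      have hklt : k < w0.length := by omega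
      have hcast : ((k + 1 : Nat) : Int) = (k : Int) + 1 := by push_cast; ring
      rw [hcast, PySem.List.pyRange_one_succ_right (by positivity), List.foldl_append,
        ih hk', List.foldl_cons, List.foldl_nil]
      have hlen : (fpart w0 k).length = w0.length := length_fpart w0 k
      have hget : PySem.List.pyGet? (fpart w0 k) (k : Int) = some (w0.getD k ' ') := by
        rw [PySem.List.pyGet?_natCast, List.getElem?_eq_getElem (by omega)]
        simp only [fpart, List.getElem_map, List.getElem_range]
        rw [if_neg (fun hc => absurd hc.1 (lt_irrefl k))]
      have hcond : (PySem.List.pyGet? (fpart w0 k) (k : Int) == some ','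
           && (((k : Int) == 0) || !(PySem.Chars.isdigit (PySem.List.pyGetD (fpart w0 k) ((k : Int) - 1) ' ')))
           && (((k : Int) + 1 == PySem.Chars.len (fpart w0 k)) || !(PySem.Chars.isdigit (PySem.List.pyGetD (fpart w0 k) ((k : Int) + 1) ' '))))
          = trig w0 k := by
        have hlenEq : PySem.Chars.len (fpart w0 k) = ((w0.length : Nat) : Int) := by
          simp [PySem.Chars.len_eq, hlen]
        have hnext : PySem.List.pyGetD (fpart w0 k) ((k : Int) + 1) ' '
            = (fpart w0 k).getD (k + 1) ' ' := by
          have : ((k : Int) + 1) = ((k + 1 : Nat) : Int) := by push_cast; ring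
          rw [this, PySem.List.pyGetD_natCast]
        have hlast : ((k : Int) + 1 == PySem.Chars.len (fpart w0 k)) = decide (k + 1 = w0.length) := by
          rw [hlenEq]
          simp [beq_eq_decide, decide_eq_decide]
          omega
        rw [hget, hnext, hlast, isdigit_fpart]
        by_cases hk0 : k = 0
        · subst hk0
          unfold trig
          simp
        · have h1 : ((k : Int) == 0) = false := by
            simp only [beq_eq_false_iff_ne, ne_eq, Int.natCast_eq_zero]
            exact hk0
          have h2 : ((k : Int) - 1) = ((k - 1 : Nat) : Int) := by
            have : 1 ≤ k := Nat.one_le_iff_ne_zero.mpr hk0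
            push_cast [this]
            ring
          rw [h1, h2, PySem.List.pyGetD_natCast, isdigit_fpart]
          unfold trig
          simp [hk0]
      rw [hcond]
      by_cases ht : trig w0 k = true
      · rw [if_pos ht]
        have hslice1 : PySem.List.slice (fpart w0 k) none (some (k : Int)) = (fpart w0 k).take k :=
          PySem.List.slice_to_natCast _ _
        have hslice2 : PySem.List.slice (fpart w0 k) (some ((k : Int) + 1)) none = (fpart w0 k).drop (k + 1) := by
          rw [show ((k : Int) + 1) = ((k + 1 : Nat) : Int) by push_cast; ring]
          exact PySem.List.slice_from_natCast _ _
        rw [hslice1, hslice2]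
        have hset : (fpart w0 k).take k ++ ['#'] ++ (fpart w0 k).drop (k + 1)
            = (fpart w0 k).set k '#' := by
          rw [List.set_eq_take_append_cons_drop, if_pos (by omega)]
          simp
        rw [hset, ← fpart_succ_of_trig w0 k hklt ht]
        simp [List.range_succ, ht]
      · rw [if_neg ht]
        rw [fpart_succ_of_not_trig w0 k (by simpa using ht)]
        simp only [List.range_succ, List.any_append, List.any_cons, List.any_nil]
        simp only [Bool.not_eq_true] at ht
        simp [ht]

theorem inner_eq (w0 : List Char) (has : Bool) :
    hasBigCommaInner w0 has = (fpart w0 w0.length, has || (List.range w0.length).any (trig w0)) := by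
  unfold hasBigCommaInner
  have h := inner_inv w0 has w0.length (le_refl _)
  rw [show PySem.Chars.len w0 = ((w0.length : Int)) from by simp [PySem.Chars.len_eq]] at *
  exact h

-- ===== bridging trig / P / scan2 / run =====

theorem go_nil (cur : List Char) (acc : List (List Char)) :
    PySem.Chars.split₀.go [] cur acc
      = if cur.isEmpty then acc.reverse else (cur.reverse :: acc).reverse := by
  rw [PySem.Chars.split₀.go]

theorem go_cons (c : Char) (rest cur : List Char) (acc : List (List Char)) :
    PySem.Chars.split₀.go (c :: rest) cur acc
      = if PySem.Chars.isspace c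
        then (if cur.isEmpty then PySem.Chars.split₀.go rest [] acc
              else PySem.Chars.split₀.go rest [] (cur.reverse :: acc))
        else PySem.Chars.split₀.go rest (c :: cur) acc := by
  rw [PySem.Chars.split₀.go]

theorem trig_eq_P (cs : List Char) (i : Nat) : trig cs i = P ' ' cs i := by
  by_cases hi : i < cs.length
  · unfold trig P
    have hprev : (decide (i = 0) || !(PySem.Chars.isdigit (cs.getD (i - 1) ' ')))
        = !(PySem.Chars.isdigit ((' ' :: cs).getD i ' ')) := by
      cases i with
      | zero => simp; decide
      | succ m => simp
    have hnext : (decide (i + 1 = cs.length) || !(PySem.Chars.isdigit (cs.getD (i + 1) ' ')))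
        = !(PySem.Chars.isdigit (cs.getD (i + 1) ' ')) := by
      by_cases h : i + 1 = cs.length
      · rw [h, List.getD_eq_default _ _ (le_refl _)]
        simp
        decide
      · simp [h]
    rw [hprev, hnext]
  · have hd : cs.getD i ' ' = ' ' := List.getD_eq_default _ _ (Nat.le_of_not_lt hi)
    unfold trig P
    rw [hd]
    simp

theorem any_P_eq_scan2 (cs : List Char) (p : Char) :
    (List.range cs.length).any (P p cs) = scan2 p cs := by
  induction cs generalizing p with
  | nil => rfl
  | cons c rest ih =>
      rw [List.length_cons, List.range_succ_eq_map, List.any_cons, List.any_map]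
      have hhead : P p (c :: rest) 0
          = ((c == ',') && !(PySem.Chars.isdigit p) && !(PySem.Chars.isdigit (rest.getD 0 ' '))) := by
        unfold P
        cases rest <;> simp
      have htail : ∀ i, (P p (c :: rest) ∘ Nat.succ) i = P c rest i := by
        intro i
        unfold P
        simp [Function.comp]
      rw [hhead, List.any_congr rfl htail, ih c]
      rfl

theorem run_scan2 (cs : List Char) (p : Char) (pend : Bool) :
    run (pend, PySem.Chars.isdigit p) cs
      = ((pend && !(PySem.Chars.isdigit (cs.getD 0 ' '))) || scan2 p cs) := by
  induction cs generalizing p pend with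
  | nil => simp [run, scan2, show PySem.Chars.isdigit ' ' = false from by decide]
  | cons c rest ih =>
      show ((pend && !(PySem.Chars.isdigit c)) || run (stepSt (pend, PySem.Chars.isdigit p) c) rest) = _
      rw [show stepSt (pend, PySem.Chars.isdigit p) c
            = ((c == ',') && !(PySem.Chars.isdigit p), PySem.Chars.isdigit c) from rfl, ih]
      show _ = ((pend && !(PySem.Chars.isdigit c))
          || ((((c == ',') && !(PySem.Chars.isdigit p)) && !(PySem.Chars.isdigit (rest.getD 0 ' '))) || scan2 c rest))
      simp [Bool.and_assoc]

theorem run_st0 (cs : List Char) : run (false, false) cs = scan2 ' ' cs := by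
  have h := run_scan2 cs ' ' false
  rw [show PySem.Chars.isdigit ' ' = false from by decide] at h
  simpa using h

theorem run_eq_fired (cs : List Char) (st : Bool × Bool) :
    run st cs = (fired st cs || (cs.foldl stepSt st).1) := by
  induction cs generalizing st with
  | nil => simp [run, fired]
  | cons c rest ih =>
      show ((st.1 && !(PySem.Chars.isdigit c)) || run (stepSt st c) rest)
          = (((st.1 && !(PySem.Chars.isdigit c)) || fired (stepSt st c) rest) || _)
      rw [ih]
      simp [Bool.or_assoc]

theorem fired_concat (w : List Char) (c : Char) (st : Bool × Bool) :
    fired st (w ++ [c]) = (fired st w || ((w.foldl stepSt st).1 && !(PySem.Chars.isdigit c))) := by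
  induction w generalizing st with
  | nil => simp [fired]
  | cons a rest ih =>
      show ((st.1 && !(PySem.Chars.isdigit a)) || fired (stepSt st a) (rest ++ [c]))
          = (((st.1 && !(PySem.Chars.isdigit a)) || fired (stepSt st a) rest) || _)
      rw [ih]
      simp [Bool.or_assoc]

theorem isspace_not_digit (c : Char) (h : PySem.Chars.isspace c = true) :
    PySem.Chars.isdigit c = false := by
  rw [Bool.eq_false_iff]
  intro hd
  unfold PySem.Chars.isdigit at hd
  unfold PySem.Chars.isspace at h
  simp only [Bool.and_eq_true, decide_eq_true_eq, Char.le_def, UInt32.le_iff_toNat_le] at hd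
  simp only [Bool.or_eq_true, Bool.and_eq_true, decide_eq_true_eq] at h
  have h0 : ('0').val.toNat = 48 := rfl
  have h9 : ('9').val.toNat = 57 := rfl
  simp only [Char.toNat] at h
  omega

theorem isspace_ne_comma (c : Char) (h : PySem.Chars.isspace c = true) :
    (c == ',') = false := by
  rw [beq_eq_false_iff_ne]
  rintro rfl
  simp [PySem.Chars.isspace] at h

theorem stepSt_space (st : Bool × Bool) (c : Char) (h : PySem.Chars.isspace c = true) :
    stepSt st c = (false, false) := by
  unfold stepSt
  rw [isspace_ne_comma c h, isspace_not_digit c h]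
  simp

-- split invariant: words produced by go, scanned word by word, equal the whole-string automaton
theorem go_any (cs : List Char) : ∀ (cur : List Char) (acc : List (List Char)),
    ((PySem.Chars.split₀.go cs cur acc).any (fun w => scan2 ' ' w))
      = ((acc.any (fun w => scan2 ' ' w) || fired (false, false) cur.reverse)
          || run (cur.reverse.foldl stepSt (false, false)) cs) := by
  induction cs with
  | nil =>
      intro cur acc
      rw [go_nil]
      cases cur with
      | nil => simp [run, fired]
      | cons a l =>
          rw [if_neg (by simp)]
          rw [List.any_reverse, List.any_cons]
          rw [← run_st0, run_eq_fired]
          show (_ || List.any acc _) = _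
          show _ = (_ || run _ [])
          show _ = (_ || (List.foldl stepSt (false, false) (a :: l).reverse).1)
          rcases fired (false, false) (a :: l).reverse with _ | _ <;>
            rcases (List.foldl stepSt (false, false) (a :: l).reverse).1 with _ | _ <;>
            simp
  | cons c rest ih =>
      intro cur acc
      rw [go_cons]
      by_cases hsp : PySem.Chars.isspace c = true
      · rw [if_pos hsp]
        have hd := isspace_not_digit c hsp
        cases cur with
        | nil =>
            simp only [List.isEmpty_nil]
            rw [if_pos trivial, ih [] acc]
            show _ = (_ || run (false, false) (c :: rest))
            show _ = (_ || ((false && !(PySem.Chars.isdigit c)) || run (stepSt (false, false) c) rest))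
            rw [stepSt_space _ c hsp]
            simp [fired]
        | cons a l =>
            rw [if_neg (by simp), ih [] ((a :: l).reverse :: acc)]
            rw [List.any_cons]
            have hrun : run ((a :: l).reverse.foldl stepSt (false, false)) (c :: rest)
                = (((a :: l).reverse.foldl stepSt (false, false)).1 || run (false, false) rest) := by
              show ((_ && !(PySem.Chars.isdigit c)) || run (stepSt _ c) rest) = _
              rw [stepSt_space _ c hsp, hd]
              simp
            rw [hrun, ← run_st0, run_eq_fired]
            show ((_ || _) || (false || run (false, false) rest)) = _
            rcases fired (false, false) (a :: l).reverse with _ | _ <;>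
              rcases (List.foldl stepSt (false, false) (a :: l).reverse).1 with _ | _ <;>
              rcases acc.any (fun w => scan2 ' ' w) with _ | _ <;>
              simp [fired]
      · rw [if_neg hsp, ih (c :: cur) acc]
        rw [show (c :: cur).reverse = cur.reverse ++ [c] from by simp,
            fired_concat, List.foldl_append]
        show _ = (_ || ((_ && !(PySem.Chars.isdigit c)) || run (stepSt (cur.reverse.foldl stepSt (false, false)) c) rest))
        simp [List.foldl_cons, Bool.or_assoc]

theorem split_any (cs : List Char) :
    ((PySem.Chars.split₀ cs).any (fun w => scan2 ' ' w)) = scan2 ' ' cs := by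
  show ((PySem.Chars.split₀.go cs [] []).any _) = _
  rw [go_any cs [] []]
  simp [fired, run_st0]

-- ===== A side: total fold =====

theorem fold_eq (ws : List String) (has : Bool) (tmp : List Char) :
    (ws.foldl
      (fun (st : Bool × List Char) word =>
        let p := hasBigCommaInner word.toList st.1
        (p.2, st.2 ++ p.1 ++ [' '])) (has, tmp)).1
    = (has || ws.any (fun w => scan2 ' ' w.toList)) := by
  induction ws generalizing has tmp with
  | nil => simp
  | cons w ws ih =>
      rw [List.foldl_cons, List.any_cons]
      show (ws.foldl _ ((hasBigCommaInner w.toList has).2, tmp ++ (hasBigCommaInner w.toList has).1 ++ [' '])).1 = _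
      rw [inner_eq, ih]
      have hw : (List.range w.toList.length).any (trig w.toList) = scan2 ' ' w.toList := by
        rw [← any_P_eq_scan2]
        exact List.any_congr rfl (trig_eq_P w.toList)
      rw [hw, Bool.or_assoc]

-- ===== B side: bMark ≠ cs equals "any P" =====

theorem bMark_getElem (cs : List Char) (j : Nat) (hj : j < cs.length) :
    (bMark cs)[j]'(by simpa [bMark] using hj)
      = if P ' ' cs j = true then '#' else cs[j] := by
  unfold bMark
  rw [List.getElem_map, List.getElem_zipIdx]
  have hP : (cs[j] == ','
       && !(decide (0 < 0 + j) && PySem.Chars.isdigit (cs.getD (0 + j - 1) ' '))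
       && !(decide (0 + j + 1 < cs.length) && PySem.Chars.isdigit (cs.getD (0 + j + 1) ' ')))
      = P ' ' cs j := by
    unfold P
    rw [List.getD_eq_getElem _ ' ' hj]
    have hprev : (!(decide (0 < 0 + j) && PySem.Chars.isdigit (cs.getD (0 + j - 1) ' ')))
        = !(PySem.Chars.isdigit ((' ' :: cs).getD j ' ')) := by
      cases j with
      | zero => simp; decide
      | succ m => simp
    have hnext : (!(decide (0 + j + 1 < cs.length) && PySem.Chars.isdigit (cs.getD (0 + j + 1) ' ')))
        = !(PySem.Chars.isdigit (cs.getD (j + 1) ' ')) := by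
      by_cases h : j + 1 < cs.length
      · simp [h]
      · rw [show (0:Nat) + j + 1 = j + 1 from by omega,
           List.getD_eq_default _ _ (show cs.length ≤ j + 1 from by omega)]
        simp [h, show PySem.Chars.isdigit ' ' = false from by decide]
    rw [hprev, hnext]
  rw [hP]

theorem bMark_ne_iff_any (cs : List Char) :
    decide (bMark cs ≠ cs) = (List.range cs.length).any (P ' ' cs) := by
  rcases h : (List.range cs.length).any (P ' ' cs) with _ | _
  · rw [List.any_eq_false] at h
    have heq : bMark cs = cs := by
      apply List.ext_getElem (by simp [bMark])
      intro j h1 h2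
      rw [bMark_getElem cs j h2,
        if_neg (by simpa using h j (List.mem_range.mpr h2))]
    simp [heq]
  · rw [List.any_eq_true] at h
    obtain ⟨j, hj, hPj⟩ := h
    rw [List.mem_range] at hj
    have hne : bMark cs ≠ cs := by
      intro heq
      have hgl : (bMark cs)[j]'(by simpa [bMark] using hj) = cs[j]'hj := List.getElem_of_eq heq _
      rw [bMark_getElem cs j hj, if_pos hPj] at hgl
      have hc : cs[j] = ',' := by
        have hx := hPj
        unfold P at hx
        simp only [Bool.and_eq_true, beq_iff_eq] at hx
        rw [← List.getD_eq_getElem _ ' ' hj]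
        exact hx.1.1
      rw [hc] at hgl
      exact absurd hgl (by decide)
    simp [hne]

theorem main_eq (t : String) :
    ((PySem.Str.split₀ t).foldl
      (fun (st : Bool × List Char) word =>
        let p := hasBigCommaInner word.toList st.1
        (p.2, st.2 ++ p.1 ++ [' '])) (false, [])).1
    = decide (bMark t.toList ≠ t.toList) := by
  rw [fold_eq, bMark_ne_iff_any, any_P_eq_scan2, ← split_any]
  rw [show PySem.Str.split₀ t = (PySem.Chars.split₀ t.toList).map String.ofList from rfl]
  rw [List.any_map]
  exact List.any_congr rfl (fun w => by simp)

-- ===== VERDICT (by name: the statement is the Claim_ definition above) =====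
theorem hasBigComma_spec : Claim_equal_hasBigComma := by
  intro s tmpStr _
  unfold Spec_hasBigComma hasBigComma hasBigComma_alt
  exact main_eq _
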